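-- pv_equiv track=rewrite | github.com/shepherdjay/reddit_challenges | challenges/challenge357_int.py | kolokaski_ratio
-- ===== SOURCE A (Python) =====
-- from typing import Tuple
--
-- def nillson_recurse():
--     yield 2
--     output = 1
--     for x in nillson_recurse():
--         for _ in range(x):
--             yield output
--         output = 3 - output
--
-- def nillson_generator():
--     yield 1
--     yield 2
--     for x in nillson_recurse():
--         yield x
--
-- def kolokaski_ratio(n: int) -> Tuple:
--     ones = 0
--     twos = 0
--     gen = nillson_generator()
--     for _ in range(n):
--         result = next(gen)
--         if result == 1:
--             ones += 1
--         elif result == 2: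
--             twos += 1
--     return ones, twos
-- ===== SOURCE B (Python) =====
-- def kolokaski_ratio(n: int):
--     if n <= 0:
--         return (0, 0)
--     seq = [1, 2, 2]
--     i = 2
--     val = 1
--     while len(seq) < n:
--         seq.extend([val] * seq[i])
--         val = 3 - val
--         i += 1
--     seq = seq[:n]
--     return (seq.count(1), seq.count(2))
-- ===== Notes on version B (the rewrite author's own statement) =====
-- stated objective: faster
-- what changed: B generates the Kolakoski prefix iteratively with one explicit list and a read pointer (append seq[i] copies of the alternating value, slice to n, count) instead of A's self-recursive lazy generators pulled one term at a time.
import Mathlib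
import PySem

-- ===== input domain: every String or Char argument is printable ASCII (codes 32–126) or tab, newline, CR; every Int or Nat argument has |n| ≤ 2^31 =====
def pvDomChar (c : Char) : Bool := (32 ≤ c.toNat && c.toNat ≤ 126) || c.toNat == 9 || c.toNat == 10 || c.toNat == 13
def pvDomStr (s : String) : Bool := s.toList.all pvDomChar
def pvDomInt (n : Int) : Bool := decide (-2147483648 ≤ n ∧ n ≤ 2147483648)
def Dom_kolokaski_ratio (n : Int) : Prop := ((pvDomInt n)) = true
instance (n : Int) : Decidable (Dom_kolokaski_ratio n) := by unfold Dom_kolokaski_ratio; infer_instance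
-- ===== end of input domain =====

-- B replaces A's self-recursive lazy generators by one iterative list with a read pointer
-- (objective: simpler); same return value for every n.

-- ===== PORT A =====
-- `nillson_recurse`'s inner `for x …: for _ in range(x): yield output; output = 3 - output`
-- applied to a finite prefix of the stream (tail-recursive; output accumulated in reverse)
def pyExpandRev : List Int → Int → List Int → List Int
  | [], _, acc => acc.reverse
  | x :: rest, v, acc => pyExpandRev rest (3 - v) (List.replicate x.toNat v ++ acc)

-- strict rendering of the lazy self-referential generator `nillson_recurse()`: its output
-- stream is the fixpoint of s ↦ 2 :: expand(s, 1) (it yields 2, then the run-expansion of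
-- its own output starting with output 1); iterate that map — each pass extends the already
-- agreed prefix by at least one term — until m terms are available (so fuel m suffices)
def nrIter (m : Nat) : Nat → List Int → List Int
  | 0, cur => cur
  | fuel + 1, cur => if cur.length < m then nrIter m fuel (2 :: pyExpandRev cur 1 []) else cur

def kolokaski_ratio (n : Int) : Int × Int :=
  -- `for _ in range(n): result = next(gen)` pulls the first n.toNat terms of
  -- `nillson_generator()` = 1, 2, then `nillson_recurse()`
  let m := n.toNat
  let terms := List.take m (1 :: 2 :: nrIter m m [2])
  terms.foldl
    (fun (p : Int × Int) result =>
      if result = 1 then (p.1 + 1, p.2)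
      else if result = 2 then (p.1, p.2 + 1)
      else p)
    (0, 0)

-- ===== PORT B =====
-- the `while len(seq) < n` loop of Source B; the Python list `seq` is modelled by an Array
-- (Python lists are dynamic arrays: O(1) index and amortised-O(1) extend).  Fuel m is
-- enough since every pass appends ≥ 1 element.  `seq[i]` is always in range (i < len(seq)
-- is a loop invariant), so getD is exact here.
def altLoop (m : Nat) : Nat → Array Int → Nat → Int → Array Int
  | 0, seq, _, _ => seq
  | fuel + 1, seq, i, val =>
    if seq.size < m then
      altLoop m fuel (seq ++ Array.replicate (seq.getD i 0).toNat val) (i + 1) (3 - val)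
    else seq

def kolokaski_ratio_alt (n : Int) : Int × Int :=
  if n ≤ 0 then (0, 0)
  else
    let m := n.toNat
    let seq := altLoop m m #[1, 2, 2] 2 1
    let s := List.take m seq.toList
    ((PySem.List.count s 1 : Int), (PySem.List.count s 2 : Int))

-- ===== PRECONDITION & SPEC =====
def Spec_kolokaski_ratio (n : Int) (out : Int × Int) : Prop := out = kolokaski_ratio_alt n
instance (n : Int) (out : Int × Int) : Decidable (Spec_kolokaski_ratio n out) := by unfold Spec_kolokaski_ratio; infer_instance

-- ===== CLAIM (what is proved, stated in full; the proofs are below) =====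
def Claim_equal_kolokaski_ratio : Prop := ∀ (n : Int), Dom_kolokaski_ratio n → Spec_kolokaski_ratio n (kolokaski_ratio n)

-- ===== LEMMAS AND PROOFS =====

-- structural (non-accumulator) version of pyExpandRev, used only in the proofs
def pyExpand (xs : List Int) (v : Int) : List Int :=
  match xs with
  | [] => []
  | x :: rest => List.replicate x.toNat v ++ pyExpand rest (3 - v)

-- the value `output` after k flips
def flipN (k : Nat) (v : Int) : Int := if k % 2 = 0 then v else 3 - v

-- reference: the state of B's loop after k (unguarded) iterations, as a plain list
def refSeq : Nat → List Int
  | 0 => [1, 2, 2]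
  | k + 1 => refSeq k ++ List.replicate ((refSeq k).getD (2 + k) 0).toNat (flipN k 1)

lemma pyExpandRev_eq (xs : List Int) (v : Int) (acc : List Int) :
    pyExpandRev xs v acc = acc.reverse ++ pyExpand xs v := by
  induction xs generalizing v acc with
  | nil => simp [pyExpandRev, pyExpand]
  | cons x rest ih =>
    simp only [pyExpandRev, pyExpand, ih, List.reverse_append, List.reverse_replicate,
      List.append_assoc]

lemma flipN_succ (k : Nat) (v : Int) : flipN (k + 1) v = flipN k (3 - v) := by
  unfold flipN
  rcases Nat.mod_two_eq_zero_or_one k with h | h <;>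
    simp [h, Nat.add_mod]

lemma pyExpand_append (xs ys : List Int) (v : Int) :
    pyExpand (xs ++ ys) v = pyExpand xs v ++ pyExpand ys (flipN xs.length v) := by
  induction xs generalizing v with
  | nil => simp [pyExpand, flipN]
  | cons x xs ih =>
    simp only [List.cons_append, pyExpand, ih, List.append_assoc, List.length_cons]
    rw [flipN_succ]

lemma refSeq_succ_isPrefix (k : Nat) : refSeq k <+: refSeq (k + 1) := by
  simp [refSeq]

lemma refSeq_isPrefix {j k : Nat} (h : j ≤ k) : refSeq j <+: refSeq k := by
  induction k with
  | zero => simp [Nat.le_zero.mp h]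
  | succ k ih =>
    rcases Nat.lt_or_ge j (k + 1) with h' | h'
    · exact (ih (Nat.lt_succ_iff.mp h')).trans (refSeq_succ_isPrefix k)
    · have : j = k + 1 := le_antisymm h h'
      simp [this]

lemma mem_refSeq {k : Nat} {x : Int} (hx : x ∈ refSeq k) : x = 1 ∨ x = 2 := by
  induction k with
  | zero =>
    simp [refSeq] at hx
    rcases hx with rfl | rfl | rfl <;> simp
  | succ k ih =>
    simp only [refSeq, List.mem_append] at hx
    rcases hx with hx | hx
    · exact ih hx
    · have := List.eq_of_mem_replicate hx
      unfold flipN at this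
      split at this <;> omega

lemma length_refSeq_ge (k : Nat) : 3 + k ≤ (refSeq k).length := by
  induction k with
  | zero => simp [refSeq]
  | succ k ih =>
    simp only [refSeq, List.length_append, List.length_replicate]
    have hk : 2 + k < (refSeq k).length := by omega
    have hmem : (refSeq k).getD (2 + k) 0 ∈ refSeq k := by
      rw [List.getD_eq_getElem _ _ hk]
      exact List.getElem_mem hk
    rcases mem_refSeq hmem with h | h <;> rw [h] <;> simp <;> omega

-- the run-length description of refSeq: its tail past position 2 is the expansion
-- of its own first k read entries
lemma refSeq_drop2 (k : Nat) :
    (refSeq k).drop 2 = 2 :: pyExpand (List.take k ((refSeq k).drop 2)) 1 := by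
  induction k with
  | zero => simp [refSeq, pyExpand]
  | succ k ih =>
    have hlen : 3 + k ≤ (refSeq k).length := length_refSeq_ge k
    have hdroplen : k + 1 ≤ ((refSeq k).drop 2).length := by
      simp [List.length_drop]; omega
    have hdrop : (refSeq (k + 1)).drop 2
        = (refSeq k).drop 2 ++ List.replicate ((refSeq k).getD (2 + k) 0).toNat (flipN k 1) := by
      rw [refSeq, List.drop_append_of_le_length (by omega)]
    have hk : k < ((refSeq k).drop 2).length := by omega
    have htake' : List.take (k + 1) ((refSeq k).drop 2)
        = List.take k ((refSeq k).drop 2) ++ [((refSeq k).drop 2).getD k 0] := by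
      rw [List.getD_eq_getElem _ _ hk, List.take_add_one, List.getElem?_eq_getElem hk]
      simp
    have hgetD : ((refSeq k).drop 2).getD k 0 = (refSeq k).getD (2 + k) 0 := by
      have hk2 : 2 + k < (refSeq k).length := by omega
      rw [List.getD_eq_getElem _ _ hk, List.getD_eq_getElem _ _ hk2, List.getElem_drop]
    have hlentake : (List.take k ((refSeq k).drop 2)).length = k := by
      simp [List.length_take]; omega
    rw [hdrop, List.take_append_of_le_length hdroplen, htake', hgetD]
    conv_lhs => rw [ih]
    rw [pyExpand_append, hlentake]
    simp [pyExpand]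

lemma drop2_prefix {j k : Nat} (h : j ≤ k) :
    (refSeq j).drop 2 <+: (refSeq k).drop 2 := by
  obtain ⟨t, ht⟩ := refSeq_isPrefix h
  refine ⟨t, ?_⟩
  rw [← ht, List.drop_append_of_le_length]
  have := length_refSeq_ge j; omega

-- A-side invariant: each pass of nrIter turns the canonical prefix of length c into
-- the canonical prefix of length |refSeq c| - 2 ≥ c + 1
lemma nrIter_spec (m : Nat) (fuel : Nat) (cur : List Int)
    (h : cur <+: (refSeq cur.length).drop 2) :
    (nrIter m fuel cur <+: (refSeq (nrIter m fuel cur).length).drop 2)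
      ∧ (m ≤ (nrIter m fuel cur).length ∨ cur.length + fuel ≤ (nrIter m fuel cur).length) := by
  induction fuel generalizing cur with
  | zero =>
    simp only [nrIter]
    exact ⟨h, Or.inr (by omega)⟩
  | succ fuel ih =>
    rw [nrIter]
    split
    · -- one pass: cur = take c (drop 2 (refSeq c)), so 2 :: expand cur 1 = drop 2 (refSeq c)
      have hlenc : cur.length + 1 ≤ ((refSeq cur.length).drop 2).length := by
        have := length_refSeq_ge cur.length
        simp [List.length_drop]; omega
      have hcur : cur = List.take cur.length ((refSeq cur.length).drop 2) :=
        List.prefix_iff_eq_take.mp h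
      have hnext : (2 :: pyExpandRev cur 1 []) = (refSeq cur.length).drop 2 := by
        rw [pyExpandRev_eq, List.reverse_nil, List.nil_append]
        conv_lhs => rw [hcur]
        rw [← refSeq_drop2]
      have hlen' : cur.length + 1 ≤ (2 :: pyExpandRev cur 1 []).length := by
        rw [hnext]; exact hlenc
      have hpre' : (2 :: pyExpandRev cur 1 [])
          <+: (refSeq (2 :: pyExpandRev cur 1 []).length).drop 2 := by
        rw [hnext]
        exact drop2_prefix (by omega)
      obtain ⟨h1, h2⟩ := ih _ hpre'
      refine ⟨h1, ?_⟩
      rcases h2 with h2 | h2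
      · exact Or.inl h2
      · exact Or.inr (by omega)
    · exact ⟨h, Or.inl (by omega)⟩

-- bridges between the Array state of B's port and the list refSeq
lemma array_getD_toList (a : Array Int) (i : Nat) (d : Int) :
    a.getD i d = a.toList.getD i d := by
  unfold Array.getD List.getD
  split
  · rename_i h
    simp [List.getElem?_eq_getElem (by simpa using h)]
  · rename_i h
    simp [List.getElem?_eq_none (by simpa using Nat.le_of_not_lt h)]

-- B's loop, started from the reference state after k steps, reaches refSeq (k+fuel)
-- up to position m
lemma altLoop_refSeq (m : Nat) (fuel k : Nat) :
    List.take m (altLoop m fuel (refSeq k).toArray (2 + k) (flipN k 1)).toList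
      = List.take m (refSeq (k + fuel)) := by
  induction fuel generalizing k with
  | zero => simp [altLoop]
  | succ fuel ih =>
    rw [altLoop]
    split
    · have hstep : (refSeq k).toArray ++ Array.replicate ((refSeq k).toArray.getD (2 + k) 0).toNat (flipN k 1)
          = (refSeq (k + 1)).toArray := by
        apply Array.toList_inj.mp
        rw [Array.toList_append]
        simp only [Array.toList_replicate, array_getD_toList]
        rw [refSeq]
      have hflip : 3 - flipN k 1 = flipN (k + 1) 1 := by
        rw [flipN_succ]
        unfold flipN
        split <;> ring
      have hi : 2 + k + 1 = 2 + (k + 1) := by omega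
      rw [hstep, hflip, hi, ih (k + 1)]
      have harith : k + 1 + fuel = k + (fuel + 1) := by omega
      rw [harith]
    · -- length ≥ m already: all later refSeq's agree up to m
      rename_i hge
      simp only [List.size_toArray] at hge
      have hpre : refSeq k <+: refSeq (k + (fuel + 1)) := refSeq_isPrefix (by omega)
      obtain ⟨t, ht⟩ := hpre
      rw [← ht, List.toList_toArray, List.take_append_of_le_length (by omega)]

-- A's fold computes the pair of counts when every element is 1 or 2
lemma foldl_count (xs : List Int) (a b : Int) (h : ∀ x ∈ xs, x = 1 ∨ x = 2) :
    xs.foldl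
      (fun (p : Int × Int) result =>
        if result = 1 then (p.1 + 1, p.2)
        else if result = 2 then (p.1, p.2 + 1)
        else p)
      (a, b) = (a + xs.count 1, b + xs.count 2) := by
  induction xs generalizing a b with
  | nil => simp
  | cons x xs ih =>
    have h' : ∀ y ∈ xs, y = 1 ∨ y = 2 := fun y hy => h y (List.mem_cons_of_mem x hy)
    rcases h x (by simp) with rfl | rfl
    · rw [List.foldl_cons]
      norm_num
      rw [ih _ _ h']
      simp only [Prod.mk.injEq]
      norm_num
      ring
    · rw [List.foldl_cons]
      norm_num
      rw [ih _ _ h']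
      simp only [Prod.mk.injEq]
      norm_num
      ring

-- ===== VERDICT (by name: the statement is the Claim_ definition above) =====
theorem kolokaski_ratio_spec : Claim_equal_kolokaski_ratio := by
  intro n _
  unfold Spec_kolokaski_ratio
  show kolokaski_ratio n = kolokaski_ratio_alt n
  by_cases hn : n ≤ 0
  · have h0 : n.toNat = 0 := Int.toNat_of_nonpos hn
    simp [kolokaski_ratio, kolokaski_ratio_alt, h0, hn, nrIter]
  · set m := n.toNat with hm
    have hm1 : 1 ≤ m := by omega
    -- A's pulled terms: nrIter reaches a canonical prefix of length ≥ m
    have hbase : ([2] : List Int) <+: (refSeq ([2] : List Int).length).drop 2 := by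
      decide
    obtain ⟨hRpre, hRlen'⟩ := nrIter_spec m m [2] hbase
    set R := nrIter m m [2] with hR
    have hRlen : m ≤ R.length := by
      rcases hRlen' with h | h
      · exact h
      · simp at h; omega
    have hsplit : ∀ j : Nat, refSeq j = 1 :: 2 :: (refSeq j).drop 2 := by
      intro j
      obtain ⟨t, ht⟩ := refSeq_isPrefix (Nat.zero_le j)
      rw [← ht]; rfl
    have hA : List.take m (1 :: 2 :: R) = List.take m (refSeq R.length) := by
      obtain ⟨t, ht⟩ := hRpre
      rw [hsplit R.length, ← ht]
      have : (1 :: 2 :: (R ++ t)) = (1 :: 2 :: R) ++ t := by simp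
      rw [this, List.take_append_of_le_length (by simp; omega)]
    have hstable : List.take m (refSeq R.length) = List.take m (refSeq m) := by
      obtain ⟨t, ht⟩ := refSeq_isPrefix hRlen
      rw [← ht, List.take_append_of_le_length (by have := length_refSeq_ge m; omega)]
    -- B's final list is the same prefix of refSeq
    have hB : List.take m (altLoop m m #[1, 2, 2] 2 1).toList = List.take m (refSeq m) := by
      have h := altLoop_refSeq m m 0
      simpa [refSeq, flipN] using h
    simp only [kolokaski_ratio, kolokaski_ratio_alt, if_neg hn, ← hm]
    rw [hA, hstable, hB, foldl_count _ 0 0 (fun x hx => mem_refSeq (List.mem_of_mem_take hx)),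
      PySem.List.count_eq, PySem.List.count_eq]
    simp
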